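-- pv_equiv track=rewrite | github.com/Archie0125/osop-mcp | tools/optimize.py | _check_independence
-- ===== SOURCE A (Python) =====
-- def _check_independence(chain: list[str], node_map: dict) -> bool:
--     """Check if nodes in a chain are data-independent (can be parallelized)."""
--     output_names = set()
--     for nid in chain:
--         node = node_map.get(nid)
--         if not node:
--             continue
--         inputs = node.get("inputs", []) or []
--         for inp in inputs:
--             if isinstance(inp, dict) and inp.get("name") in output_names:
--                 return False  # This node depends on a prior node's output
--         outputs = node.get("outputs", []) or []
--         for out in outputs:
--             if isinstance(out, dict):
--                 output_names.add(out.get("name"))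
--     return True
-- ===== SOURCE B (Python) =====
-- def _check_independence(chain: list[str], node_map: dict) -> bool:
--     """Check if nodes in a chain are data-independent (can be parallelized)."""
--     # Pass 1: earliest position in the chain at which each output name is produced.
--     producer_index = {}
--     for pos, nid in enumerate(chain):
--         node = node_map.get(nid)
--         if not node:
--             continue
--         for out in (node.get("outputs", []) or []):
--             if isinstance(out, dict):
--                 producer_index.setdefault(out.get("name"), pos)
--     # Pass 2: a node depends on a prior node iff some input name was produced strictly earlier.
--     for pos, nid in enumerate(chain):
--         node = node_map.get(nid)
--         if not node:
--             continue
--         for inp in (node.get("inputs", []) or []):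
--             if isinstance(inp, dict):
--                 name = inp.get("name")
--                 if name in producer_index and producer_index[name] < pos:
--                     return False
--     return True
-- ===== Notes on version B (the rewrite author's own statement) =====
-- stated objective: alternative
-- what changed: Replaced A's single interleaved loop that accumulates a growing set of seen output names with two separate passes: first build a producer index mapping each output name to the earliest chain position producing it, then scan consumers comparing positions (producer_index[name] < pos).
import Mathlib
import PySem

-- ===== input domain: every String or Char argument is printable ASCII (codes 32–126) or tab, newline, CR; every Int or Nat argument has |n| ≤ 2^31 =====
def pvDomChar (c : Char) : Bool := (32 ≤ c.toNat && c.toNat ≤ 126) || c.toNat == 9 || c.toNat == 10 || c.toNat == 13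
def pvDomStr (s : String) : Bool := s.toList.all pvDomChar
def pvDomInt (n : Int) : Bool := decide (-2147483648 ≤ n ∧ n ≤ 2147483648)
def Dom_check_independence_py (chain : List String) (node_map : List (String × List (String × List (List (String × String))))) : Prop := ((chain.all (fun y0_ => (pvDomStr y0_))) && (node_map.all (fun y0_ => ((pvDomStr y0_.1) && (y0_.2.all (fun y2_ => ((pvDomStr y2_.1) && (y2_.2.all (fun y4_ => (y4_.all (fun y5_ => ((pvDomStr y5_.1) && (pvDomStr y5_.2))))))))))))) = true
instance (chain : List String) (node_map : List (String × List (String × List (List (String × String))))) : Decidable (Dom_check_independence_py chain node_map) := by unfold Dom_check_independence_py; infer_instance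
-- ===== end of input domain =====

-- B replaces A's single interleaved loop (accumulating a set of already-seen output
-- names) with two separate passes: build an earliest-producer position index first,
-- then scan consumers comparing positions (alternative decomposition, same cost).

abbrev PvNode : Type := List (String × List (List (String × String)))

-- ===== PORT A =====
-- A's single loop over the chain, carrying the accumulated set of prior output names.
def aLoop (node_map : List (String × PvNode)) : List String → PySem.Set (Option String) → Bool
  | [], _ => true
  | nid :: rest, output_names =>
    match (PySem.Dict.mk node_map).get? nid with
    | none => aLoop node_map rest output_names    -- `if not node: continue` (missing key)
    | some node =>
      if node = [] then aLoop node_map rest output_names    -- `if not node: continue` (empty dict)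
      else
        -- `node.get("inputs", []) or []`: values are lists, so `or []` is the identity
        let inputs := (PySem.Dict.mk node).getD "inputs" []
        -- `isinstance(inp, dict)` is always true at this type; early `return False` → List.any
        if inputs.any (fun inp => PySem.Set.contains output_names ((PySem.Dict.mk inp).get? "name")) then
          false
        else
          let outputs := (PySem.Dict.mk node).getD "outputs" []
          aLoop node_map rest
            (outputs.foldl (fun s out => PySem.Set.add s ((PySem.Dict.mk out).get? "name")) output_names)

def check_independence_py (chain : List String) (node_map : List (String × List (String × List (List (String × String))))) : Bool :=
  aLoop node_map chain PySem.Set.empty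

-- ===== PORT B =====
-- B pass 1: producer_index.setdefault(out.get("name"), pos) over the enumerated chain.
def bBuild (node_map : List (String × PvNode)) : Int → List String → PySem.Dict (Option String) Int → PySem.Dict (Option String) Int
  | _, [], d => d
  | p, nid :: rest, d =>
    bBuild node_map (p + 1) rest
      (match (PySem.Dict.mk node_map).get? nid with
       | none => d
       | some node =>
         if node = [] then d
         else
           ((PySem.Dict.mk node).getD "outputs" []).foldl
             (fun d out => d.setdefault ((PySem.Dict.mk out).get? "name") p) d)

-- B pass 2: `name in producer_index and producer_index[name] < pos` → return False.
def bScan (node_map : List (String × PvNode)) (prod : PySem.Dict (Option String) Int) : Int → List String → Bool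
  | _, [] => true
  | p, nid :: rest =>
    match (PySem.Dict.mk node_map).get? nid with
    | none => bScan node_map prod (p + 1) rest
    | some node =>
      if node = [] then bScan node_map prod (p + 1) rest
      else if ((PySem.Dict.mk node).getD "inputs" []).any (fun inp =>
                 match prod.get? ((PySem.Dict.mk inp).get? "name") with
                 | some i => decide (i < p)
                 | none => false) then
        false
      else bScan node_map prod (p + 1) rest

def check_independence_py_alt (chain : List String) (node_map : List (String × List (String × List (List (String × String))))) : Bool :=
  bScan node_map (bBuild node_map 0 chain PySem.Dict.empty) 0 chain

-- ===== PRECONDITION & SPEC =====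
def Spec_check_independence_py (chain : List String) (node_map : List (String × List (String × List (List (String × String))))) (out : Bool) : Prop := out = check_independence_py_alt chain node_map
instance (chain : List String) (node_map : List (String × List (String × List (List (String × String))))) (out : Bool) : Decidable (Spec_check_independence_py chain node_map out) := by unfold Spec_check_independence_py; infer_instance

-- ===== CLAIM (what is proved, stated in full; the proofs are below) =====
def Claim_equal_check_independence_py : Prop := ∀ (chain : List String) (node_map : List (String × List (String × List (List (String × String))))), Dom_check_independence_py chain node_map → Spec_check_independence_py chain node_map (check_independence_py chain node_map)

-- ===== LEMMAS AND PROOFS =====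

-- left-biased choice on Option Int (proof-side helper)
def pvOr (a b : Option Int) : Option Int :=
  match a with
  | some i => some i
  | none => b

theorem pvOr_assoc (a b c : Option Int) : pvOr (pvOr a b) c = pvOr a (pvOr b c) := by
  cases a <;> simp [pvOr]

-- the "name" entries of a node's list under a key
def pvNames (node : PvNode) (key : String) : List (Option String) :=
  ((PySem.Dict.mk node).getD key []).map (fun o => (PySem.Dict.mk o).get? "name")

-- earliest position ≥ p in the suffix l at which output name n is produced
def pvFirst (node_map : List (String × PvNode)) : Int → List String → Option String → Option Int
  | _, [], _ => none
  | p, nid :: rest, n =>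
    match (PySem.Dict.mk node_map).get? nid with
    | none => pvFirst node_map (p + 1) rest n
    | some node =>
      if node = [] then pvFirst node_map (p + 1) rest n
      else if n ∈ pvNames node "outputs" then some p else pvFirst node_map (p + 1) rest n

theorem pvFirst_ge (node_map : List (String × PvNode)) (l : List String) :
    ∀ (p i : Int) (n : Option String), pvFirst node_map p l n = some i → p ≤ i := by
  induction l with
  | nil => intro p i n h; simp [pvFirst] at h
  | cons nid rest ih =>
    intro p i n h
    cases hm : (PySem.Dict.mk node_map).get? nid with
    | none =>
      simp only [pvFirst, hm] at h
      have := ih (p + 1) i n h; omega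
    | some node =>
      by_cases hz : node = []
      · simp only [pvFirst, hm, hz, if_pos] at h
        have := ih (p + 1) i n h; omega
      · by_cases ho : n ∈ pvNames node "outputs"
        · simp only [pvFirst, hm, if_neg hz, if_pos ho, Option.some.injEq] at h
          omega
        · simp only [pvFirst, hm, if_neg hz, if_neg ho] at h
          have := ih (p + 1) i n h; omega

theorem setdefault_fold_get? (p : Int) (n : Option String) (outs : List (List (String × String))) :
    ∀ (d : PySem.Dict (Option String) Int),
      (outs.foldl (fun d out => d.setdefault ((PySem.Dict.mk out).get? "name") p) d).get? n
        = pvOr (d.get? n)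
            (if n ∈ outs.map (fun o => (PySem.Dict.mk o).get? "name") then some p else none) := by
  induction outs with
  | nil => intro d; cases h : d.get? n <;> simp [pvOr, h]
  | cons o rest ih =>
    intro d
    simp only [List.foldl_cons]
    rw [ih]
    have hsd : ∀ k : Option String, (d.setdefault k p).get? n
        = pvOr (d.get? n) (if n = k then some p else none) := by
      intro k
      by_cases he : n = k
      · rw [he, PySem.Dict.get?_setdefault_self]
        cases d.get? k <;> simp [pvOr]
      · rw [PySem.Dict.get?_setdefault_of_ne _ _ he]
        cases d.get? n <;> simp [pvOr, he]
    rw [hsd, pvOr_assoc]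
    congr 1
    by_cases he : n = (PySem.Dict.mk o).get? "name" <;>
      by_cases hr : n ∈ rest.map (fun o => (PySem.Dict.mk o).get? "name") <;>
      simp [pvOr, he, hr]

theorem bBuild_get? (node_map : List (String × PvNode)) (l : List String) :
    ∀ (p : Int) (d : PySem.Dict (Option String) Int) (n : Option String),
      (bBuild node_map p l d).get? n = pvOr (d.get? n) (pvFirst node_map p l n) := by
  induction l with
  | nil => intro p d n; cases h : d.get? n <;> simp [bBuild, pvFirst, pvOr, h]
  | cons nid rest ih =>
    intro p d n
    unfold bBuild pvFirst
    cases hm : (PySem.Dict.mk node_map).get? nid with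
    | none => rw [ih]
    | some node =>
      by_cases hz : node = []
      · simp only [if_pos hz]; rw [ih]
      · simp only [if_neg hz]
        rw [ih, setdefault_fold_get?, pvOr_assoc]
        congr 1
        by_cases ho : n ∈ pvNames node "outputs" <;>
          [skip; skip] <;>
          · simp only [pvNames] at ho ⊢
            simp [pvOr, ho]

theorem set_fold_contains (s : PySem.Set (Option String)) (outs : List (List (String × String))) (n : Option String) :
    PySem.Set.contains (outs.foldl (fun s out => PySem.Set.add s ((PySem.Dict.mk out).get? "name")) s) n
      = (PySem.Set.contains s n || decide (n ∈ outs.map (fun o => (PySem.Dict.mk o).get? "name"))) := by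
  rw [Bool.eq_iff_iff, PySem.Set.contains_iff, PySem.Set.mem_foldl_add]
  simp only [Bool.or_eq_true, PySem.Set.contains_iff, decide_eq_true_iff, List.mem_map]
  constructor
  · rintro (hs | ⟨b, hb, he⟩)
    · exact Or.inl hs
    · exact Or.inr ⟨b, hb, he.symm⟩
  · rintro (hs | ⟨b, hb, he⟩)
    · exact Or.inl hs
    · exact Or.inr ⟨b, hb, he.symm⟩

theorem pvMain (node_map : List (String × PvNode)) (prod : PySem.Dict (Option String) Int) :
    ∀ (l : List String) (p : Int) (outs : PySem.Set (Option String))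
      (earlier : Option String → Option Int),
      (∀ n, prod.get? n = pvOr (earlier n) (pvFirst node_map p l n)) →
      (∀ n i, earlier n = some i → i < p) →
      (∀ n, PySem.Set.contains outs n = (earlier n).isSome) →
      aLoop node_map l outs = bScan node_map prod p l := by
  intro l
  induction l with
  | nil => intro p outs earlier _ _ _; rfl
  | cons nid rest ih =>
    intro p outs earlier h1 h2 h3
    unfold aLoop bScan
    cases hm : (PySem.Dict.mk node_map).get? nid with
    | none =>
      apply ih (p + 1) outs earlier
      · intro n; rw [h1 n]; simp [pvFirst, hm]
      · intro n i he; have := h2 n i he; omega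
      · exact h3
    | some node =>
      by_cases hz : node = []
      · simp only [if_pos hz]
        apply ih (p + 1) outs earlier
        · intro n; rw [h1 n]; simp [pvFirst, hm, hz]
        · intro n i he; have := h2 n i he; omega
        · exact h3
      · simp only [if_neg hz]
        -- pointwise equality of the two per-input tests
        have hcond : ∀ n : Option String,
            PySem.Set.contains outs n
              = (match prod.get? n with
                 | some i => decide (i < p)
                 | none => false) := by
          intro n
          rw [h1 n, h3 n]
          cases he : earlier n with
          | some i =>
            have : i < p := h2 n i he
            simp [pvOr, this]
          | none =>
            simp only [pvOr, Option.isSome_none]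
            cases hf : pvFirst node_map p (nid :: rest) n with
            | none => rfl
            | some i =>
              have : p ≤ i := pvFirst_ge node_map (nid :: rest) p i n hf
              simp; omega
        have hany :
            ((PySem.Dict.mk node).getD "inputs" []).any
                (fun inp => PySem.Set.contains outs ((PySem.Dict.mk inp).get? "name"))
              = ((PySem.Dict.mk node).getD "inputs" []).any
                (fun inp =>
                   match prod.get? ((PySem.Dict.mk inp).get? "name") with
                   | some i => decide (i < p)
                   | none => false) := by
          congr 1
          funext inp
          exact hcond ((PySem.Dict.mk inp).get? "name")
        rw [hany]
        cases hA : ((PySem.Dict.mk node).getD "inputs" []).any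
                (fun inp =>
                   match prod.get? ((PySem.Dict.mk inp).get? "name") with
                   | some i => decide (i < p)
                   | none => false) with
        | true => simp
        | false =>
          simp only [Bool.false_eq_true, if_false]
          apply ih (p + 1)
            (((PySem.Dict.mk node).getD "outputs" []).foldl
               (fun s out => PySem.Set.add s ((PySem.Dict.mk out).get? "name")) outs)
            (fun n => pvOr (earlier n) (if n ∈ pvNames node "outputs" then some p else none))
          · intro n
            rw [h1 n, pvOr_assoc]
            congr 1
            simp only [pvFirst, hm, if_neg hz]
            by_cases ho : n ∈ pvNames node "outputs" <;> simp [pvOr, ho]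
          · intro n i he
            cases hee : earlier n with
            | some j =>
              simp [pvOr, hee] at he
              have := h2 n j hee; omega
            | none =>
              simp [pvOr, hee] at he
              by_cases ho : n ∈ pvNames node "outputs"
              · simp [ho] at he; omega
              · simp [ho] at he
          · intro n
            rw [set_fold_contains, h3 n]
            cases hee : earlier n with
            | some j => simp [pvOr]
            | none =>
              simp only [pvOr, Option.isSome_none, Bool.false_or]
              by_cases ho : n ∈ pvNames node "outputs"
              · simp only [pvNames] at ho
                simp [pvNames, ho]
              · simp only [pvNames] at ho
                simp [pvNames, ho]

-- ===== VERDICT (by name: the statement is the Claim_ definition above) =====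
theorem check_independence_py_spec : Claim_equal_check_independence_py := by
  intro chain node_map _
  unfold Spec_check_independence_py check_independence_py check_independence_py_alt
  apply pvMain node_map _ chain 0 PySem.Set.empty (fun _ => none)
  · intro n
    rw [bBuild_get? node_map chain 0 PySem.Dict.empty n]
    simp [pvOr, PySem.Dict.get?_empty]
  · intro n i h; simp at h
  · intro n; simp [PySem.Set.empty, PySem.Set.contains]
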